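-- pv_equiv track=rewrite | github.com/AsokTamang/TypeExpress | p.py | calculatecount
-- ===== SOURCE A (Python) =====
-- def calculatecount(p, s, target):
--     totalcount = 0
--     m = []
--     for num in p:
--         m.append(num)
--     for num in s:
--         if target - num in m:
--             totalcount += 1
--     return totalcount
-- ===== SOURCE B (Python) =====
-- def calculatecount(p, s, target):
--     countS = {}
--     for num in s:
--         countS[num] = countS.get(num, 0) + 1
--     total = 0
--     for z in set(p):
--         total += countS.get(target - z, 0)
--     return total
-- ===== Notes on version B (the rewrite author's own statement) =====
-- stated objective: faster
-- what changed: Instead of scanning the copied list p for each element of s (quadratic), B builds a frequency map of s once and sums, over the distinct elements z of p, the count of s-elements equal to target - z.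
import Mathlib
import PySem

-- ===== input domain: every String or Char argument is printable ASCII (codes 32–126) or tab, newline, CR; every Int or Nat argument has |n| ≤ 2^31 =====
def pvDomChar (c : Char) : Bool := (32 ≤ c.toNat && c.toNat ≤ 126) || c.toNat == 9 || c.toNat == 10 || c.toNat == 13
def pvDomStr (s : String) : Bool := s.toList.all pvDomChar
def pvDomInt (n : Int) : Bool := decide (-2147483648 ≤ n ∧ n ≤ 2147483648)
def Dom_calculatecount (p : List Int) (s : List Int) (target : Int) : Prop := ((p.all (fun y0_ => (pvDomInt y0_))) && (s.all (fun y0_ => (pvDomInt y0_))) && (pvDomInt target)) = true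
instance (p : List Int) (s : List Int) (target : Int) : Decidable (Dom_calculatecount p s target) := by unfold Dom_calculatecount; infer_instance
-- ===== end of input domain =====

-- B replaces A's per-element scan of the copied list p by a frequency map of s summed over the distinct elements of p (objective: faster).

-- ===== PORT A =====
def calculatecount (p : List Int) (s : List Int) (target : Int) : Int :=
  let m := p.foldl (fun m num => m ++ [num]) []
  s.foldl (fun totalcount num => if (target - num) ∈ m then totalcount + 1 else totalcount) 0

-- ===== PORT B =====
def calculatecount_alt (p : List Int) (s : List Int) (target : Int) : Int :=
  let countS := s.foldl (fun d num => d.insert num (d.getD num 0 + 1)) (PySem.Dict.empty : PySem.Dict Int Int)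
  (PySem.Set.ofList p).foldl (fun total z => total + countS.getD (target - z) 0) 0

-- ===== PRECONDITION & SPEC =====
def Spec_calculatecount (p : List Int) (s : List Int) (target : Int) (out : Int) : Prop := out = calculatecount_alt p s target
instance (p : List Int) (s : List Int) (target : Int) (out : Int) : Decidable (Spec_calculatecount p s target out) := by unfold Spec_calculatecount; infer_instance

-- ===== CLAIM (what is proved, stated in full; the proofs are below) =====
def Claim_equal_calculatecount : Prop := ∀ (p : List Int) (s : List Int) (target : Int), Dom_calculatecount p s target → Spec_calculatecount p s target (calculatecount p s target)

-- ===== LEMMAS AND PROOFS =====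

-- A's first loop just copies p.
theorem copy_loop_eq (p acc : List Int) : p.foldl (fun m num => m ++ [num]) acc = acc ++ p := by
  induction p generalizing acc with
  | nil => simp
  | cons a t ih => simp [List.foldl, ih, List.append_assoc]

theorem foldl_add_eq_sum (l : List Int) (f : Int → Int) (init : Int) :
    l.foldl (fun t z => t + f z) init = init + (l.map f).sum := by
  induction l generalizing init with
  | nil => simp
  | cons a t ih => simp [List.foldl, ih]; ring

theorem sum_map_indicator (c : Int) (l : List Int) (h : l.Nodup) :
    (l.map (fun z => if z = c then (1 : Int) else 0)).sum = if c ∈ l then 1 else 0 := by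
  induction l with
  | nil => simp
  | cons a t ih =>
    rcases List.nodup_cons.mp h with ⟨ha, ht⟩
    by_cases hac : a = c
    · subst hac
      have hna : ¬ (a ∈ t) := ha
      simp only [List.map_cons, List.sum_cons, ih ht, if_neg hna,
        List.mem_cons, true_or, if_pos]
      norm_num
    · simp [hac, ih ht, Ne.symm hac]

theorem main_sum (p s : List Int) (target : Int) :
    ((PySem.Set.ofList p).map (fun z => (s.count (target - z) : Int))).sum
      = s.foldl (fun tc num => if (target - num) ∈ p then tc + 1 else tc) 0 := by
  induction s with
  | nil => simp
  | cons a t ih =>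
    have hsplit : ((PySem.Set.ofList p).map (fun z => ((a :: t).count (target - z) : Int))).sum
        = ((PySem.Set.ofList p).map (fun z => (t.count (target - z) : Int))).sum
          + ((PySem.Set.ofList p).map (fun z => if z = target - a then (1 : Int) else 0)).sum := by
      rw [← List.sum_map_add]
      apply congrArg
      apply List.map_congr_left
      intro z _
      rw [List.count_cons]
      by_cases hz : z = target - a
      · have haz : a = target - z := by omega
        simp only [beq_iff_eq, if_pos haz, if_pos hz]
        push_cast; ring
      · have haz : ¬ (a = target - z) := by omega
        simp only [beq_iff_eq, if_neg haz, if_neg hz]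
        push_cast; ring
    rw [hsplit, ih, sum_map_indicator _ _ (PySem.Set.nodup_ofList p)]
    have hmem : (target - a) ∈ PySem.Set.ofList p ↔ (target - a) ∈ p := PySem.Set.mem_ofList p (target - a)
    have hfold : ∀ (l : List Int) (i j : Int),
        l.foldl (fun tc num => if (target - num) ∈ p then tc + 1 else tc) (i + j)
          = l.foldl (fun tc num => if (target - num) ∈ p then tc + 1 else tc) i + j := by
      intro l
      induction l with
      | nil => intro i j; simp
      | cons b u ihu =>
        intro i j
        by_cases hb : (target - b) ∈ p
        · simp only [List.foldl, hb, if_pos]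
          rw [show i + j + 1 = (i + 1) + j by ring, ihu]
        · simp only [List.foldl, hb, if_neg, not_false_iff]
          exact ihu i j
    by_cases hap : (target - a) ∈ p
    · simp only [List.foldl, hap, if_pos, hmem.mpr hap, if_pos]
      rw [show (0 : Int) + 1 = 0 + 1 by ring, hfold t 0 1]
    · have : ¬ ((target - a) ∈ PySem.Set.ofList p) := fun hc => hap (hmem.mp hc)
      simp [List.foldl, hap, this]

-- ===== VERDICT (by name: the statement is the Claim_ definition above) =====
theorem calculatecount_spec : Claim_equal_calculatecount := by
  intro p s target _
  unfold Spec_calculatecount calculatecount calculatecount_alt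
  simp only [copy_loop_eq, List.nil_append,
    PySem.Dict.foldl_insert_getD_add_one_eq_counter]
  rw [foldl_add_eq_sum]
  have : ∀ z : Int, (PySem.Dict.counter s).getD (target - z) 0 = (s.count (target - z) : Int) := by
    intro z; exact PySem.Dict.getD_counter ..
  rw [List.map_congr_left (fun z _ => this z), zero_add, main_sum]
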